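-- pv_equiv track=rewrite | github.com/kamerons/dde-extract-gear | shared/card_verification.py | _interpret_level_digits
-- ===== SOURCE A (Python) =====
-- def _interpret_level_digits(digits: list[int]) -> tuple[int | None, int | None]:
--     """
--     Map digit model outputs (0-9 or 10 for slash) to (current_level, max_level).
--     Expects 3, 4, or 5 values with slash in the middle. Validates 1 <= max_level <= 16 and current_level <= max_level.
--     Returns (None, None) if invalid.
--     """
--     n = len(digits)
--     if n == 3:
--         x_val = digits[0] if digits[0] <= 9 else None
--         y_val = digits[2] if digits[2] <= 9 else None
--         if x_val is None or y_val is None: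
--             return None, None
--         current_level, max_level = x_val, y_val
--     elif n == 4:
--         if digits[0] > 9 or digits[2] > 9 or digits[3] > 9:
--             return None, None
--         current_level = digits[0]
--         max_level = 10 * digits[2] + digits[3]
--     elif n == 5:
--         if any(d > 9 for d in [digits[0], digits[1], digits[3], digits[4]]):
--             return None, None
--         current_level = 10 * digits[0] + digits[1]
--         max_level = 10 * digits[3] + digits[4]
--     else:
--         return None, None
--     if not (1 <= max_level <= 16 and current_level is not None and current_level <= max_level):
--         return None, None
--     return current_level, max_level
-- ===== SOURCE B (Python) =====
-- def _fold10(ds):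
--     acc = 0
--     for d in ds:
--         acc = 10 * acc + d
--     return acc
--
--
-- def _interpret_level_digits(digits):
--     n = len(digits)
--     if n < 3 or n > 5:
--         return None, None
--     # slash sits at index (n-1)//2; current level is everything before it,
--     # max level everything after it (the slash digit itself is never read)
--     k = (n - 1) // 2
--     head, tail = digits[:k], digits[k + 1:]
--     if max(head + tail) > 9:
--         return None, None
--     cur, mx = _fold10(head), _fold10(tail)
--     if 1 <= mx <= 16 and cur <= mx:
--         return cur, mx
--     return None, None
-- ===== Notes on version B (the rewrite author's own statement) =====
-- stated objective: simpler
-- what changed: Instead of three hand-written per-length branches over fixed indices, B computes the slash position k=(n-1)//2 once, slices the list into the digits before and after it, validates them with a single max() scan, and folds each slice into its number with acc=10*acc+d.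
import Mathlib
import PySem

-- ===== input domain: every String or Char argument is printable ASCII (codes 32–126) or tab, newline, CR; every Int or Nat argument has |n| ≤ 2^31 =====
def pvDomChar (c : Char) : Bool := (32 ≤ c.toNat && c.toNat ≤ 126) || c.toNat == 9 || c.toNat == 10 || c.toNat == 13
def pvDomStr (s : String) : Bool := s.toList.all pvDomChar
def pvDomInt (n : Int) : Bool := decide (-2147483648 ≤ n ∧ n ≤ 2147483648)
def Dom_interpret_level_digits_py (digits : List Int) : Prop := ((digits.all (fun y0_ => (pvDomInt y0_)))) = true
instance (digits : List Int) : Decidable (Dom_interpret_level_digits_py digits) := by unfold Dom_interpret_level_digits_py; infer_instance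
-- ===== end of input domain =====

-- B: instead of three per-length branches, computes the slash index k=(n-1)//2 once and slices the list around it; same values as A everywhere (objective: simpler).


-- ===== PORT A =====
-- A's final validation: 1 <= max_level <= 16 and current_level <= max_level
def pvFinishA (cur mx : Int) : Option Int × Option Int :=
  if 1 ≤ mx ∧ mx ≤ 16 ∧ cur ≤ mx then (some cur, some mx) else (none, none)

def interpret_level_digits_py (digits : List Int) : Option Int × Option Int :=
  -- branches on len(digits) = 3/4/5 exactly as A; indexing is in range in each branch
  match digits with
  | [d0, _, d2] =>
      let x_val : Option Int := if d0 ≤ 9 then some d0 else none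
      let y_val : Option Int := if d2 ≤ 9 then some d2 else none
      match x_val, y_val with
      | some cur, some mx => pvFinishA cur mx
      | _, _ => (none, none)
  | [d0, _, d2, d3] =>
      if d0 > 9 ∨ d2 > 9 ∨ d3 > 9 then (none, none)
      else pvFinishA d0 (10 * d2 + d3)
  | [d0, d1, _, d3, d4] =>
      if d0 > 9 ∨ d1 > 9 ∨ d3 > 9 ∨ d4 > 9 then (none, none)
      else pvFinishA (10 * d0 + d1) (10 * d3 + d4)
  | _ => (none, none)

-- ===== PORT B =====
-- Source B's _fold10: acc = 10*acc + d over a digit list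
def pvFold10 (ds : List Int) : Int :=
  ds.foldl (fun acc d => 10 * acc + d) 0

def interpret_level_digits_py_alt (digits : List Int) : Option Int × Option Int :=
  let n : Int := digits.length
  if n < 3 ∨ n > 5 then (none, none)
  else
    -- slash sits at index (n-1)//2; slice the list around it
    let k : Int := PySem.Int.floordiv (n - 1) 2
    let head := PySem.List.slice digits none (some k)
    let tail := PySem.List.slice digits (some (k + 1)) none
    match PySem.List.max? (head ++ tail) (fun x => x) with
    | some m =>
        if m > 9 then (none, none)
        else
          let cur := pvFold10 head
          let mx := pvFold10 tail
          if 1 ≤ mx ∧ mx ≤ 16 ∧ cur ≤ mx then (some cur, some mx) else (none, none)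
    | none => (none, none)

-- ===== PRECONDITION & SPEC =====
def Spec_interpret_level_digits_py (digits : List Int) (out : Option Int × Option Int) : Prop := out = interpret_level_digits_py_alt digits
instance (digits : List Int) (out : Option Int × Option Int) : Decidable (Spec_interpret_level_digits_py digits out) := by unfold Spec_interpret_level_digits_py; infer_instance

-- ===== CLAIM =====
def Claim_equal_interpret_level_digits_py : Prop := ∀ (digits : List Int), Dom_interpret_level_digits_py digits → Spec_interpret_level_digits_py digits (interpret_level_digits_py digits)

-- ===== LEMMAS AND PROOFS =====

-- ===== VERDICT =====
set_option maxHeartbeats 1000000 in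
theorem interpret_level_digits_py_spec : Claim_equal_interpret_level_digits_py := by
  intro digits _
  unfold Spec_interpret_level_digits_py
  match digits with
  | [] => rfl
  | [_] => rfl
  | [_, _] => rfl
  | [d0, d1, d2] =>
      simp [pysem, interpret_level_digits_py, interpret_level_digits_py_alt, pvFold10,
        pvFinishA, PySem.List.max?_id_cons]
      split_ifs <;> simp_all <;> omega
  | [d0, d1, d2, d3] =>
      simp [pysem, interpret_level_digits_py, interpret_level_digits_py_alt, pvFold10,
        pvFinishA, PySem.List.max?_id_cons]
  | [d0, d1, d2, d3, d4] =>
      simp [pysem, interpret_level_digits_py, interpret_level_digits_py_alt, pvFold10,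
        pvFinishA, PySem.List.max?_id_cons]
  | a :: b :: c :: d :: e :: f :: rest =>
      have h6 : (6:Int) ≤ (a :: b :: c :: d :: e :: f :: rest).length := by
        simp [List.length]; omega
      simp only [interpret_level_digits_py, interpret_level_digits_py_alt]
      rw [if_pos (by right; omega)]
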